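-- pv_equiv track=rewrite | github.com/carlzimmerman/zimmerman-formula | research/proof_attempt/final_proof_attempt.py | analyze_adjacent_differences
-- ===== SOURCE A (Python) =====
-- from math import gcd, sqrt, log, exp, factorial, ceil, floor
-- from itertools import combinations
--
-- def bound_term_k(N, k, primes):
--     """Compute and bound the k-th term."""
--     if k == 0:
--         return N, N
--
--     # Exact computation
--     exact = 0
--     for combo in combinations(primes, k):
--         product = 1
--         valid = True
--         for p in combo:
--             product *= p
--             if product > N:
--                 valid = False
--                 break
--         if valid:
--             exact += N // product
--
--     # Bound: N * (log log N)^k / k!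
--     lam = log(log(N)) if N > 2 else 0.5
--     bound = N * (lam**k) / factorial(k)
--
--     return exact, bound
--
-- def analyze_adjacent_differences(N, primes):
--     """Analyze differences between adjacent terms."""
--     terms = []
--     for k in range(15):
--         exact, _ = bound_term_k(N, k, primes)
--         terms.append(exact)
--
--     # Compute adjacent differences
--     diffs = []
--     for k in range(len(terms) - 1):
--         diff = terms[k] - terms[k + 1]
--         diffs.append(diff)
--
--     return terms, diffs
-- ===== SOURCE B (Python) =====
-- def analyze_adjacent_differences(N, primes):
--     """Analyze differences between adjacent terms."""
--     def term(k, rest, product):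
--         # Sum of N // (product * p1 * ... * pk) over index-increasing choices of k
--         # primes from rest whose running products all stay <= N (pruned recursion).
--         if k == 0:
--             return N // product
--         if not rest:
--             return 0
--         tail = rest[1:]
--         q = product * rest[0]
--         skip = term(k, tail, product)
--         if q <= N:
--             return term(k - 1, tail, q) + skip
--         return skip
--
--     terms = [term(k, primes, 1) for k in range(15)]
--     diffs = [terms[k] - terms[k + 1] for k in range(14)]
--     return terms, diffs
-- ===== Notes on version B (the rewrite author's own statement) =====
-- stated objective: alternative
-- what changed: Replaced the per-k enumeration of all itertools.combinations (re-checking every k-subset against N) by a pruned recursion over the prime list that only descends while the running product stays <= N; the pruning pays off on growing (e.g. genuinely prime) factor lists but not on arbitrary integer lists, so no speed is claimed.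
import Mathlib
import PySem

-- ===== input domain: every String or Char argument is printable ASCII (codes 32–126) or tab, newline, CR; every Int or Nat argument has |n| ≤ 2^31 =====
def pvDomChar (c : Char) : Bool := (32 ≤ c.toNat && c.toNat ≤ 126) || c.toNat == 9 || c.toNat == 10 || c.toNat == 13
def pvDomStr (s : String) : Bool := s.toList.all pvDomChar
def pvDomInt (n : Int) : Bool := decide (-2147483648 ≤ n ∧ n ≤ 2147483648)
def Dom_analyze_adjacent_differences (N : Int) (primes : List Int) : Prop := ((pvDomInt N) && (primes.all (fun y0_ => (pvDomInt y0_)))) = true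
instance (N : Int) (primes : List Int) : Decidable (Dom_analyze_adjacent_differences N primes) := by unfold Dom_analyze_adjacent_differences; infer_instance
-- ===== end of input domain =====

-- B replaces A's per-k enumeration of every itertools.combinations(primes, k) by one pruned
-- recursion over the prime list that only descends while the running product stays ≤ N (alternative).

-- ===== PORT A =====
-- itertools.combinations(primes, k), in its generation order
def pvCombos : Nat → List Int → List (List Int)
  | 0, _ => [[]]
  | _ + 1, [] => []
  | k + 1, p :: rest => (pvCombos k rest).map (fun c => p :: c) ++ pvCombos (k + 1) rest

-- inner loop of bound_term_k: product *= p; if product > N: valid = False; break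
def pvProdValid (N : Int) : List Int → Int → Int × Bool
  | [], prod => (prod, true)
  | p :: rest, prod =>
      let prod' := prod * p
      if prod' > N then (prod', false) else pvProdValid N rest prod'

-- the 'exact' component of bound_term_k (the float 'bound' is discarded by the caller; not ported)
def pvBoundTermExact (N : Int) (k : Nat) (primes : List Int) : Int :=
  if k = 0 then N
  else
    (pvCombos k primes).foldl (fun exact combo =>
      let pv := pvProdValid N combo 1
      if pv.2 then exact + PySem.Int.floordiv N pv.1 else exact) 0

def analyze_adjacent_differences (N : Int) (primes : List Int) : List Int × List Int :=
  let terms := (List.range 15).map (fun k => pvBoundTermExact N k primes)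
  let diffs := (List.range (terms.length - 1)).map (fun k => terms.getD k 0 - terms.getD (k + 1) 0)
  (terms, diffs)

-- ===== PORT B =====
-- pruned recursion: sum of N // (prod·choice of k primes from rest, indices increasing),
-- descending only while the running product stays ≤ N
def pvTerm (N : Int) : Nat → List Int → Int → Int
  | 0, _, prod => PySem.Int.floordiv N prod
  | _ + 1, [], _ => 0
  | k + 1, p :: tail, prod =>
      let q := prod * p
      let skip := pvTerm N (k + 1) tail prod
      if q ≤ N then pvTerm N k tail q + skip else skip

def analyze_adjacent_differences_alt (N : Int) (primes : List Int) : List Int × List Int :=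
  let terms := (List.range 15).map (fun k => pvTerm N k primes 1)
  let diffs := (List.range 14).map (fun k => terms.getD k 0 - terms.getD (k + 1) 0)
  (terms, diffs)

-- ===== PRECONDITION & SPEC =====
-- Pre_ excludes exactly the inputs where A raises ZeroDivisionError (0 among the primes with
-- 0 ≤ N makes a valid zero product reach N // product); B raises there as well.
def Pre_analyze_adjacent_differences (N : Int) (primes : List Int) : Prop :=
  ¬ ((0 : Int) ∈ primes ∧ 0 ≤ N)
instance (N : Int) (primes : List Int) : Decidable (Pre_analyze_adjacent_differences N primes) := by
  unfold Pre_analyze_adjacent_differences; infer_instance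
def pvWitness_analyze_adjacent_differences : Int × List Int := (100, [2, 3, 5])

def Spec_analyze_adjacent_differences (N : Int) (primes : List Int) (out : List Int × List Int) : Prop := out = analyze_adjacent_differences_alt N primes
instance (N : Int) (primes : List Int) (out : List Int × List Int) : Decidable (Spec_analyze_adjacent_differences N primes out) := by unfold Spec_analyze_adjacent_differences; infer_instance

-- ===== CLAIM (what is proved, stated in full; the proofs are below) =====
def Claim_equal_analyze_adjacent_differences : Prop := ∀ (N : Int) (primes : List Int), Dom_analyze_adjacent_differences N primes → Pre_analyze_adjacent_differences N primes → Spec_analyze_adjacent_differences N primes (analyze_adjacent_differences N primes)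

-- ===== LEMMAS AND PROOFS =====

-- the weight A's fold adds for one combination (0 if some running product exceeds N)
def pvAdd (N prod : Int) (c : List Int) : Int :=
  let pv := pvProdValid N c prod
  if pv.2 then PySem.Int.floordiv N pv.1 else 0

theorem pv_fold_eq_sum (N : Int) : ∀ (xs : List (List Int)) (a : Int),
    xs.foldl (fun exact combo =>
      let pv := pvProdValid N combo 1
      if pv.2 then exact + PySem.Int.floordiv N pv.1 else exact) a
      = a + (xs.map (pvAdd N 1)).sum := by
  intro xs
  induction xs with
  | nil => intro a; simp
  | cons c rest ih =>
      intro a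
      simp only [List.foldl_cons, List.map_cons, List.sum_cons, ih, pvAdd]
      by_cases h : (pvProdValid N c 1).2 <;> (simp [h]; try ring)

theorem pv_key (N : Int) : ∀ (l : List Int) (k : Nat) (prod : Int),
    ((pvCombos k l).map (pvAdd N prod)).sum = pvTerm N k l prod := by
  intro l
  induction l with
  | nil =>
      intro k prod
      cases k <;> simp [pvCombos, pvTerm, pvAdd, pvProdValid]
  | cons p tail ih =>
      intro k prod
      cases k with
      | zero => simp [pvCombos, pvTerm, pvAdd, pvProdValid]
      | succ k =>
          simp only [pvCombos, List.map_append, List.sum_append, List.map_map]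
          by_cases h : prod * p ≤ N
          · have e1 : (pvAdd N prod ∘ fun c => p :: c) = pvAdd N (prod * p) := by
              funext c
              simp [pvAdd, pvProdValid, Function.comp, not_lt.mpr h]
            rw [e1, ih k (prod * p), ih (k + 1) prod]
            simp [pvTerm, h]
          · have e1 : (pvAdd N prod ∘ fun c => p :: c) = fun _ => (0 : Int) := by
              funext c
              simp [pvAdd, pvProdValid, Function.comp, lt_of_not_ge h]
            rw [e1, ih (k + 1) prod]
            simp [pvTerm, h]

theorem pv_exact_eq_term (N : Int) (primes : List Int) (k : Nat) :
    pvBoundTermExact N k primes = pvTerm N k primes 1 := by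
  cases k with
  | zero => simp [pvBoundTermExact, pvTerm, PySem.Int.floordiv]
  | succ k =>
      simp only [pvBoundTermExact, Nat.succ_ne_zero, pv_fold_eq_sum, zero_add, pv_key]
      simp

-- ===== VERDICT (by name: the statement is the Claim_ definition above) =====
theorem analyze_adjacent_differences_spec : Claim_equal_analyze_adjacent_differences := by
  intro N primes _ _
  unfold Spec_analyze_adjacent_differences analyze_adjacent_differences analyze_adjacent_differences_alt
  simp [pv_exact_eq_term]
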